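-- pv_equiv track=rewrite | github.com/Isanur960/Enc_IS | EncApp/views.py | FileExtRev
-- ===== SOURCE A (Python) =====
-- def FileExtRev(f):
--     in_fn = str(f)
--     l = len(in_fn)
--     n = -1
--     f_ext = ''
--     while True:
--         letter = in_fn[n]
--         if letter == '.':
--             break
--         f_ext = f_ext + letter
--         n = n - 1
--     return f_ext
-- ===== SOURCE B (Python) =====
-- def FileExtRev(f):
--     return str(f).rsplit('.', 1)[1][::-1]
-- ===== Notes on version B (the rewrite author's own statement) =====
-- stated objective: idiomatic
-- what changed: Replaces the explicit backwards while-loop with negative indexing and character-by-character accumulation by a one-line rsplit on the last dot followed by slice reversal.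
import Mathlib
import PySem

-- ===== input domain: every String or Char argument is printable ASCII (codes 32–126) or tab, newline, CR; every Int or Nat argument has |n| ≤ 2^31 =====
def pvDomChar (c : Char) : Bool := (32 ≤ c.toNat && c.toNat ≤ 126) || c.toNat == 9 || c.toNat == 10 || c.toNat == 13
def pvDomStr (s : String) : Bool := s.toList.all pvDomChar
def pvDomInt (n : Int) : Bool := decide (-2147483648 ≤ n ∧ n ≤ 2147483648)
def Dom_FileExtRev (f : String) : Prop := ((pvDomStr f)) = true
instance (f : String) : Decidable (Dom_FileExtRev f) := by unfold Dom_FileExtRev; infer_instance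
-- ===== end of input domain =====

-- B replaces A's backwards while-loop (negative indexing, char-by-char string concat)
-- by `str(f).rsplit('.', 1)[1][::-1]`: split on the last dot, reverse the extension.

-- ===== PORT A =====
-- A walks the string from the end via negative indices n = -1, -2, …; that traversal
-- is the structural recursion over the reversed character list, appending each
-- non-dot letter to the accumulator string f_ext (f_ext = f_ext + letter).
def FileExtRevLoop (cs : List Char) (f_ext : String) : String :=
  match cs with
  | [] => f_ext            -- Python raises IndexError here (no dot): excluded by Pre_
  | letter :: rest =>
      if letter = '.' then f_ext
      else FileExtRevLoop rest (f_ext ++ letter.toString)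

def FileExtRev (f : String) : String :=
  FileExtRevLoop f.toList.reverse ""

-- ===== PORT B =====
-- rsplit('.', 1)[1] = the characters after the LAST dot; [::-1] reverses them.
def FileExtRev_alt (f : String) : String :=
  let ext := (f.toList.reverse.takeWhile (fun c => c ≠ '.')).reverse  -- rsplit('.',1)[1]
  String.ofList ext.reverse                                              -- [::-1]

-- ===== PRECONDITION & SPEC =====
-- Pre_ excludes strings without a dot, on which Python A raises IndexError.
def Pre_FileExtRev (f : String) : Prop := '.' ∈ f.toList
instance (f : String) : Decidable (Pre_FileExtRev f) := by unfold Pre_FileExtRev; infer_instance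
def pvWitness_FileExtRev : String := "a.txt"

def Spec_FileExtRev (f : String) (out : String) : Prop := out = FileExtRev_alt f
instance (f : String) (out : String) : Decidable (Spec_FileExtRev f out) := by unfold Spec_FileExtRev; infer_instance

-- ===== CLAIM =====
def Claim_equal_FileExtRev : Prop := ∀ (f : String), Dom_FileExtRev f → Pre_FileExtRev f → Spec_FileExtRev f (FileExtRev f)

-- ===== LEMMAS AND PROOFS =====
theorem FileExtRevLoop_eq (cs : List Char) (acc : String) :
    FileExtRevLoop cs acc = acc ++ String.ofList (cs.takeWhile (fun c => c ≠ '.')) := by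
  induction cs generalizing acc with
  | nil =>
      apply String.toList_inj.mp
      simp [FileExtRevLoop]
  | cons c rest ih =>
      by_cases h : c = '.'
      · apply String.toList_inj.mp
        simp [FileExtRevLoop, h, List.takeWhile]
      · rw [FileExtRevLoop, if_neg h, ih]
        apply String.toList_inj.mp
        simp [List.takeWhile, h, Char.toString]

-- ===== VERDICT =====
theorem FileExtRev_spec : Claim_equal_FileExtRev := by
  intro f _ _
  unfold Spec_FileExtRev FileExtRev FileExtRev_alt
  simp [FileExtRevLoop_eq]
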